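-- pv_equiv track=rewrite | github.com/NLSARCOS/agency-os | kernel/prompt_engine.py | _compress_whitespace
-- ===== SOURCE A (Python) =====
-- def _compress_whitespace(text: str) -> str:
--     """Remove redundant whitespace while preserving structure."""
--     lines = text.split("\n")
--     compressed = []
--     prev_empty = False
--     for line in lines:
--         stripped = line.rstrip()
--         is_empty = not stripped
--         if is_empty and prev_empty:
--             continue  # Skip consecutive empty lines
--         compressed.append(stripped)
--         prev_empty = is_empty
--     return "\n".join(compressed)
-- ===== SOURCE B (Python) =====
-- from itertools import groupby
--
--
-- def _compress_whitespace(text: str) -> str: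
--     """Remove redundant whitespace while preserving structure."""
--     lines = [line.rstrip() for line in text.split("\n")]
--     result = []
--     for is_blank, group in groupby(lines, key=lambda l: l == ""):
--         if is_blank:
--             result.append("")
--         else:
--             result.extend(group)
--     return "\n".join(result)
-- ===== Notes on version B (the rewrite author's own statement) =====
-- stated objective: idiomatic
-- what changed: Replaces the prev-empty boolean flag loop with a two-phase pipeline: strip all lines first, then squash each maximal run of blank lines to one via itertools.groupby.
import Mathlib
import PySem

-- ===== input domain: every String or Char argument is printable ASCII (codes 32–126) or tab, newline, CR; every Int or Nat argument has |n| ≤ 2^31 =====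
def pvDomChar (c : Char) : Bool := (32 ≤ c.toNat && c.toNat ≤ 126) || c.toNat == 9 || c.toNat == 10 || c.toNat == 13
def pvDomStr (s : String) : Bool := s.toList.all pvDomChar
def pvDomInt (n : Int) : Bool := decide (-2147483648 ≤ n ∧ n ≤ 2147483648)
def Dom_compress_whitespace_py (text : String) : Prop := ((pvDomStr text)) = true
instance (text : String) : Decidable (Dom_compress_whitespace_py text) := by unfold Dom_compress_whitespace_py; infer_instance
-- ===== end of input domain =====

-- B strips all lines first and squashes each maximal run of blank lines to one (groupby style),
-- instead of A's single pass with a prev-empty flag; same cost, more idiomatic.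

-- ===== PORT A =====
def compress_whitespace_py (text : String) : String :=
  let lines := ((PySem.Str.split? text "\n").getD [])
  let st := lines.foldl (fun (acc : List String × Bool) line =>
      let stripped := PySem.Str.rstrip line
      let is_empty := stripped == ""
      if is_empty && acc.2 then acc
      else (acc.1 ++ [stripped], is_empty)) ([], false)
  PySem.Str.join "\n" st.1

-- ===== PORT B =====
-- groupby over the stripped lines: a blank group contributes one "", a nonblank group all its lines
def pvSquash : List String → List String
  | [] => []
  | l :: rest =>
    if l == "" then
      "" :: pvSquash (rest.dropWhile (· == ""))
    else
      (l :: rest.takeWhile (fun s => !(s == ""))) ++ pvSquash (rest.dropWhile (fun s => !(s == "")))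
termination_by xs => xs.length
decreasing_by
  · have := List.length_dropWhile_le (· == "") rest; simp; omega
  · have := List.length_dropWhile_le (fun s => !(s == "")) rest; simp; omega

def compress_whitespace_py_alt (text : String) : String :=
  let lines := (((PySem.Str.split? text "\n").getD [])).map PySem.Str.rstrip
  PySem.Str.join "\n" (pvSquash lines)

-- ===== PRECONDITION & SPEC =====
def Spec_compress_whitespace_py (text : String) (out : String) : Prop := out = compress_whitespace_py_alt text
instance (text : String) (out : String) : Decidable (Spec_compress_whitespace_py text out) := by unfold Spec_compress_whitespace_py; infer_instance

-- ===== CLAIM (what is proved, stated in full; the proofs are below) =====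
def Claim_equal_compress_whitespace_py : Prop := ∀ (text : String), Dom_compress_whitespace_py text → Spec_compress_whitespace_py text (compress_whitespace_py text)

-- ===== LEMMAS AND PROOFS =====

-- A's loop as a structural recursion on the list of lines
def pvALoop : List String → Bool → List String
  | [], _ => []
  | line :: rest, prev =>
    let stripped := PySem.Str.rstrip line
    let is_empty := stripped == ""
    if is_empty && prev then pvALoop rest prev
    else stripped :: pvALoop rest is_empty

theorem pvFoldl_eq_aLoop (xs : List String) (acc : List String) (prev : Bool) :
    (xs.foldl (fun (acc : List String × Bool) line =>
      let stripped := PySem.Str.rstrip line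
      let is_empty := stripped == ""
      if is_empty && acc.2 then acc
      else (acc.1 ++ [stripped], is_empty)) (acc, prev)).1 = acc ++ pvALoop xs prev := by
  induction xs generalizing acc prev with
  | nil => simp [pvALoop]
  | cons line rest ih =>
    simp only [List.foldl_cons, pvALoop]
    by_cases h : (PySem.Str.rstrip line == "") && prev
    · simp only [h, if_pos rfl]
      have hp : prev = true := by cases prev <;> simp_all
      have he : (PySem.Str.rstrip line == "") = true := by cases hh : (PySem.Str.rstrip line == "") <;> simp_all
      rw [ih]
      simp [h]
    · simp only [h]
      rw [if_neg (by simp_all), ih]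
      simp [h, List.append_assoc]

-- squash splits off a leading nonblank run
theorem pvSquash_split (ys : List String) :
    pvSquash ys = ys.takeWhile (fun s => !(s == "")) ++ pvSquash (ys.dropWhile (fun s => !(s == ""))) := by
  cases ys with
  | nil => simp [pvSquash]
  | cons l rest =>
    by_cases h : l == ""
    · simp [List.takeWhile_cons, List.dropWhile_cons, h]
    · rw [pvSquash]
      simp [List.takeWhile_cons, List.dropWhile_cons, h]

-- A's loop equals B's squash of the stripped lines (both flag values at once)
theorem pvALoop_eq_squash (xs : List String) :
    pvALoop xs false = pvSquash (xs.map PySem.Str.rstrip) ∧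
    pvALoop xs true = pvSquash ((xs.map PySem.Str.rstrip).dropWhile (· == "")) := by
  induction xs with
  | nil => simp [pvALoop, pvSquash]
  | cons line rest ih =>
    by_cases h : PySem.Str.rstrip line == ""
    · have he : PySem.Str.rstrip line = "" := by simpa using h
      constructor
      · have e1 : pvALoop (line :: rest) false = PySem.Str.rstrip line :: pvALoop rest true := by
          simp [pvALoop, h]
        rw [e1, ih.2, List.map_cons, he, pvSquash]
        simp
      · have e1 : pvALoop (line :: rest) true = pvALoop rest true := by
          simp [pvALoop, h]
        rw [e1, ih.2, List.map_cons, List.dropWhile_cons, if_pos h]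
    · have e1 : ∀ b, pvALoop (line :: rest) b = PySem.Str.rstrip line :: pvALoop rest false := by
        intro b; cases b <;> simp [pvALoop, h]
      constructor
      · rw [e1, ih.1, List.map_cons,
            pvSquash_split (PySem.Str.rstrip line :: rest.map PySem.Str.rstrip),
            pvSquash_split (rest.map PySem.Str.rstrip)]
        simp [List.takeWhile_cons, List.dropWhile_cons, h]
      · rw [e1, ih.1, List.map_cons, List.dropWhile_cons, if_neg h,
            pvSquash_split (PySem.Str.rstrip line :: rest.map PySem.Str.rstrip),
            pvSquash_split (rest.map PySem.Str.rstrip)]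
        simp [List.takeWhile_cons, List.dropWhile_cons, h]

-- ===== VERDICT (by name: the statement is the Claim_ definition above) =====
theorem compress_whitespace_py_spec : Claim_equal_compress_whitespace_py := by
  intro text _
  unfold Spec_compress_whitespace_py compress_whitespace_py compress_whitespace_py_alt
  simp only []
  rw [pvFoldl_eq_aLoop]
  rw [(pvALoop_eq_squash (((PySem.Str.split? text "\n").getD []))).1]
  simp
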